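-- pv_equiv track=rewrite | github.com/unidel2035/hives | experiments/validate_fix.py | has_compressed_patterns
-- ===== SOURCE A (Python) =====
-- def has_compressed_patterns(domain: str) -> bool:
--     """Check if domain contains unresolved compressed patterns"""
--     # Compressed patterns that should NOT appear in final output
--     compressed_patterns = [
--         '!A', '!B', '!C', '!D', '!E', '!F', '!G', '!H', '!I', '!J', '!K', '!L',
--         '!M', '!N', '!O', '!P', '!Q', '!R', '!S', '!T', '!U', '!V', '!W', '!X',
--         '!Y', '!Z', '!@', '!#', '!$', '!%', '!^', '!&', '!*', '!(', '!)', '!=',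
--         '!+', '!/', '!,', '!<', '!>', '!~', '![', '!]', '!{', '!}', '!`', '!:',
--         '!;', '!?'
--     ]
--
--     # Single uppercase letters (should be expanded)
--     if any(char.isupper() for char in domain):
--         return True
--
--     # Special symbols that indicate compression
--     special_symbols = set('@#$%^&*()=+[]{}`;:<>~')
--     if any(char in special_symbols for char in domain):
--         return True
--
--     # Two-char compressed patterns
--     for pattern in compressed_patterns:
--         if pattern in domain:
--             return True
--
--     return False
-- ===== SOURCE B (Python) =====
-- def has_compressed_patterns(domain: str) -> bool:
--     """Single pass: fire on an uppercase or special char, or on an exclamation mark followed by one of the three residual pattern characters the per-char checks do not cover."""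
--     specials = '@#$%^&*()=+[]{}`;:<>~'
--     for i, ch in enumerate(domain):
--         if ch.isupper() or ch in specials:
--             return True
--         if ch == '!' and i + 1 < len(domain) and domain[i + 1] in '/,?':
--             return True
--     return False
-- ===== Notes on version B (the rewrite author's own statement) =====
-- stated objective: faster
-- what changed: A's three separate full scans (uppercase check, set-membership check, 50-entry two-char-pattern substring loop) are fused into one left-to-right pass with a one-char lookahead after an exclamation mark for the three residual pattern characters not already covered by the per-char checks.
import Mathlib
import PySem

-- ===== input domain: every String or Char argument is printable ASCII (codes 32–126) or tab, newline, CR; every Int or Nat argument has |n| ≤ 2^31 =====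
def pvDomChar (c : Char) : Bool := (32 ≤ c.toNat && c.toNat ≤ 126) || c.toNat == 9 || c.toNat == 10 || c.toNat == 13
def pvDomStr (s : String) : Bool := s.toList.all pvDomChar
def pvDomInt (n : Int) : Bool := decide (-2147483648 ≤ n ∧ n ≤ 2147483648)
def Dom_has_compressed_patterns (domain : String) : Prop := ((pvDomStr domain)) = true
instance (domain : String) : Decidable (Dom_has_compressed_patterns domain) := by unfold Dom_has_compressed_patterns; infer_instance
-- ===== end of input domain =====

-- B replaces A's three separate full scans plus a 50-pattern substring loop by a single
-- left-to-right pass with one-char lookahead (objective: simpler, one traversal).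

-- ===== PORT A =====
def pvPatternsA : List (List Char) :=
  [['!', 'A'], ['!', 'B'], ['!', 'C'], ['!', 'D'], ['!', 'E'], ['!', 'F'],
   ['!', 'G'], ['!', 'H'], ['!', 'I'], ['!', 'J'], ['!', 'K'], ['!', 'L'],
   ['!', 'M'], ['!', 'N'], ['!', 'O'], ['!', 'P'], ['!', 'Q'], ['!', 'R'],
   ['!', 'S'], ['!', 'T'], ['!', 'U'], ['!', 'V'], ['!', 'W'], ['!', 'X'],
   ['!', 'Y'], ['!', 'Z'], ['!', '@'], ['!', '#'], ['!', '$'], ['!', '%'],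
   ['!', '^'], ['!', '&'], ['!', '*'], ['!', '('], ['!', ')'], ['!', '='],
   ['!', '+'], ['!', '/'], ['!', ','], ['!', '<'], ['!', '>'], ['!', '~'],
   ['!', '['], ['!', ']'], ['!', '{'], ['!', '}'], ['!', '`'], ['!', ':'],
   ['!', ';'], ['!', '?']]

def pvSpecialsA : PySem.Set Char := PySem.Set.ofList "@#$%^&*()=+[]{}`;:<>~".toList

def has_compressed_patterns (domain : String) : Bool :=
  if domain.toList.any (fun c => PySem.Chars.isupper c) then true
  else if domain.toList.any (fun c => PySem.Set.contains pvSpecialsA c) then true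
  else if pvPatternsA.any (fun p => PySem.Chars.isIn p domain.toList) then true
  else false

-- ===== PORT B =====
def pvSpecialsB : List Char := "@#$%^&*()=+[]{}`;:<>~".toList
def pvResidB : List Char := "/,?".toList

def pvAltGo : List Char → Bool
  | [] => false
  | c :: rest =>
    if PySem.Chars.isupper c || pvSpecialsB.contains c then true
    else if c == '!' && (match rest.head? with
                         | some d => pvResidB.contains d
                         | none => false) then true
    else pvAltGo rest

def has_compressed_patterns_alt (domain : String) : Bool := pvAltGo domain.toList

-- ===== PRECONDITION & SPEC =====
def Spec_has_compressed_patterns (domain : String) (out : Bool) : Prop := out = has_compressed_patterns_alt domain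
instance (domain : String) (out : Bool) : Decidable (Spec_has_compressed_patterns domain out) := by unfold Spec_has_compressed_patterns; infer_instance

-- ===== CLAIM (what is proved, stated in full; the proofs are below) =====
def Claim_equal_has_compressed_patterns : Prop := ∀ (domain : String), Dom_has_compressed_patterns domain → Spec_has_compressed_patterns domain (has_compressed_patterns domain)

-- ===== LEMMAS AND PROOFS =====

-- the common characterisation both sides are reduced to
def pvHit (l : List Char) : Prop :=
  (∃ c ∈ l, PySem.Chars.isupper c = true) ∨ (∃ c ∈ l, c ∈ pvSpecialsB) ∨
    (∃ b ∈ pvResidB, ['!', b] <:+: l)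

-- every pattern is '!' followed by an uppercase, special or residual char (Bool form, kernel-checked)
theorem pv_pat_all : (pvPatternsA.all fun p => p.tail.all fun b =>
    decide (p = ['!', b]) &&
      (PySem.Chars.isupper b || pvSpecialsB.contains b || pvResidB.contains b)) = true := by rfl

theorem pv_pat_classify : ∀ p ∈ pvPatternsA, ∀ b ∈ p.tail,
    p = ['!', b] ∧ (PySem.Chars.isupper b = true ∨ b ∈ pvSpecialsB ∨ b ∈ pvResidB) := by
  have h := pv_pat_all
  simp only [List.all_eq_true, Bool.and_eq_true, Bool.or_eq_true, decide_eq_true_eq] at h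
  intro p hp b hb
  obtain ⟨h1, h2⟩ := h p hp b hb
  refine ⟨h1, ?_⟩
  rcases h2 with (hu | hs) | hr
  · exact Or.inl hu
  · exact Or.inr (Or.inl (by simpa using hs))
  · exact Or.inr (Or.inr (by simpa using hr))

theorem pv_pat_len : ∀ q ∈ pvPatternsA, q.length = 2 := by
  have h : (pvPatternsA.all fun q => q.length == 2) = true := by rfl
  simpa only [List.all_eq_true, beq_iff_eq] using h

theorem pv_specialsA_contains (c : Char) :
    PySem.Set.contains pvSpecialsA c = true ↔ c ∈ pvSpecialsB := by
  have h : pvSpecialsA = pvSpecialsB := by rfl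
  rw [h]
  simp [PySem.Set.contains]

theorem pv_resid_pattern : ∀ b ∈ pvResidB, ['!', b] ∈ pvPatternsA := by
  intro b hb
  have hb' : b = '/' ∨ b = ',' ∨ b = '?' := by simpa [pvResidB] using hb
  rcases hb' with rfl | rfl | rfl <;>
    exact List.mem_of_elem_eq_true rfl

theorem pvA_iff (domain : String) :
    has_compressed_patterns domain = true ↔ pvHit domain.toList := by
  unfold has_compressed_patterns pvHit
  split_ifs with h1 h2 h3
  · simp only [List.any_eq_true] at h1
    simpa using Or.inl h1
  · simp only [List.any_eq_true] at h2
    refine iff_of_true rfl (Or.inr (Or.inl ?_))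
    obtain ⟨c, hc, hm⟩ := h2
    exact ⟨c, hc, (pv_specialsA_contains c).mp hm⟩
  · simp only [List.any_eq_true] at h3
    obtain ⟨p, hp, hin⟩ := h3
    have hinf := (PySem.Chars.isIn_iff_infix p domain.toList).mp hin
    refine iff_of_true rfl ?_
    match p, pv_pat_len p hp with
    | [a, b], _ =>
      obtain ⟨hpeq, hdisj⟩ := pv_pat_classify _ hp b (by simp)
      have ha : a = '!' := by simpa using hpeq
      have hbmem : b ∈ domain.toList := hinf.subset (by simp)
      rcases hdisj with hu | hs | hr
      · exact Or.inl ⟨b, hbmem, hu⟩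
      · exact Or.inr (Or.inl ⟨b, hbmem, hs⟩)
      · exact Or.inr (Or.inr ⟨b, hr, ha ▸ hinf⟩)
  · simp only [List.any_eq_true, not_exists, not_and] at h1 h2 h3
    refine iff_of_false (by simp) ?_
    rintro (⟨c, hc, hu⟩ | ⟨c, hc, hs⟩ | ⟨b, hb, hinf⟩)
    · exact absurd hu (by simpa using h1 c hc)
    · exact (h2 c hc) ((pv_specialsA_contains c).mpr hs)
    · exact (h3 _ (pv_resid_pattern b hb))
        ((PySem.Chars.isIn_iff_infix _ _).mpr hinf)

theorem pvB_iff (l : List Char) : pvAltGo l = true ↔ pvHit l := by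
  induction l with
  | nil => simp [pvAltGo, pvHit, List.infix_nil]
  | cons c rest ih =>
    unfold pvAltGo pvHit
    rw [pvHit] at ih
    simp only [List.mem_cons, List.infix_cons_iff, List.cons_prefix_cons]
    constructor
    · intro h
      split_ifs at h with h1 h2
      · rcases Bool.or_eq_true_iff.mp h1 with hu | hs
        · exact Or.inl ⟨c, Or.inl rfl, hu⟩
        · exact Or.inr (Or.inl ⟨c, Or.inl rfl, by simpa using hs⟩)
      · simp only [Bool.and_eq_true, beq_iff_eq] at h2
        obtain ⟨hc, hd⟩ := h2
        match rest, hd with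
        | d :: t, hd =>
          refine Or.inr (Or.inr ⟨d, by simpa using hd, Or.inl ⟨hc.symm, ?_⟩⟩)
          simp
      · rcases ih.mp h with ⟨x, hx, hu⟩ | ⟨x, hx, hs⟩ | ⟨b, hb, hinf⟩
        · exact Or.inl ⟨x, Or.inr hx, hu⟩
        · exact Or.inr (Or.inl ⟨x, Or.inr hx, hs⟩)
        · exact Or.inr (Or.inr ⟨b, hb, Or.inr hinf⟩)
    · intro h
      split_ifs with h1 h2
      · rfl
      · rfl
      · apply ih.mpr
        simp only [Bool.or_eq_true, not_or] at h1
        rcases h with ⟨x, hx | hx, hu⟩ | ⟨x, hx | hx, hs⟩ | ⟨b, hb, ⟨hbc, hpre⟩ | hinf⟩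
        · exact absurd (hx ▸ hu) h1.1
        · exact Or.inl ⟨x, hx, hu⟩
        · exact absurd (by simpa using (hx ▸ hs)) h1.2
        · exact Or.inr (Or.inl ⟨x, hx, hs⟩)
        · -- '!'-lookahead branch was false: contradiction
          exfalso
          apply h2
          simp only [Bool.and_eq_true, beq_iff_eq]
          refine ⟨hbc.symm, ?_⟩
          obtain ⟨t, ht⟩ := hpre
          cases rest with
          | nil => simp at ht
          | cons d t' =>
            simp only [List.cons_append, List.nil_append, List.cons.injEq] at ht
            obtain ⟨rfl, -⟩ := ht
            simpa [List.head?_cons] using hb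
        · exact Or.inr (Or.inr ⟨b, hb, hinf⟩)

-- ===== VERDICT (by name: the statement is the Claim_ definition above) =====
theorem has_compressed_patterns_spec : Claim_equal_has_compressed_patterns := by
  intro domain _
  unfold Spec_has_compressed_patterns has_compressed_patterns_alt
  have hA := pvA_iff domain
  have hB := pvB_iff domain.toList
  rcases hAB : has_compressed_patterns domain with _ | _ <;>
    rcases hBb : pvAltGo domain.toList with _ | _
  · rfl
  · exact absurd (hA.mpr (hB.mp hBb)) (by simp [hAB])
  · exact absurd (hB.mpr (hA.mp hAB)) (by simp [hBb])
  · rfl
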